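-- pv_equiv track=rewrite | github.com/stbrumme/leetcode | 0777.py | canTransform
-- ===== SOURCE A (Python) =====
-- def canTransform(start: str, end: str) -> bool:
--     # L and R must retain their order
--     # verify it by removing any Xs
--     if start.replace("X", "") != end.replace("X", ""):
--         return False
--
--     r1 = [ i for i, c in enumerate(start) if c == "R" ]
--     r2 = [ i for i, c in enumerate(end)   if c == "R" ]
--     l1 = [ i for i, c in enumerate(start) if c == "L" ]
--     l2 = [ i for i, c in enumerate(end)   if c == "L" ]
--
--     if len(r1) != len(r2):
--         return False
--     # now len(l1) == len(l2), too
--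
--     # "R" can't move left
--     for a, b in zip(r1, r2):
--         if a > b:
--             return False
--
--     # "L" can't move right
--     for a, b in zip(l1, l2):
--         if a < b:
--             return False
--
--     return True
-- ===== SOURCE B (Python) =====
-- def canTransform(start: str, end: str) -> bool:
--     # single two-pointer pass over both strings, skipping 'X's
--     i = j = 0
--     n, m = len(start), len(end)
--     while True:
--         while i < n and start[i] == 'X':
--             i += 1
--         while j < m and end[j] == 'X':
--             j += 1
--         if i == n and j == m:
--             return True
--         if i == n or j == m:
--             return False
--         if start[i] != end[j]:
--             return False
--         if start[i] == 'R' and i > j: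
--             return False
--         if start[i] == 'L' and i < j:
--             return False
--         i += 1
--         j += 1
-- ===== Notes on version B (the rewrite author's own statement) =====
-- stated objective: alternative
-- what changed: Replaced A's replace-and-compare plus four enumerate comprehensions and zip scans with a single two-pointer pass that skips 'X's and checks character equality and the R/L index constraints on the fly.
import Mathlib
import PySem

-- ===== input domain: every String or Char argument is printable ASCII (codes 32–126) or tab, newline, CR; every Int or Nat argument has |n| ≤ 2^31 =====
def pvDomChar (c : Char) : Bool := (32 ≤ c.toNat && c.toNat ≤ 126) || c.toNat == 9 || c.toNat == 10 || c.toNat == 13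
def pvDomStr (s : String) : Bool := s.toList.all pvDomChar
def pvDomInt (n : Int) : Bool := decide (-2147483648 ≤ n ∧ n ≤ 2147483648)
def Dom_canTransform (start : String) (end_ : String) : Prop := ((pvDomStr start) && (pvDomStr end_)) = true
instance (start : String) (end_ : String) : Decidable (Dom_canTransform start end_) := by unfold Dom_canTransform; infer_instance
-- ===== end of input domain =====

-- B replaces A's replace-and-compare plus four index-list comprehensions by a single two-pointer pass (an alternative algorithm; same result).

-- ===== PORT A =====
def canTransform (start : String) (end_ : String) : Bool :=
  -- if start.replace("X","") != end.replace("X",""): return False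
  if PySem.Str.replace start "X" "" ≠ PySem.Str.replace end_ "X" "" then false
  else
    -- r1/r2/l1/l2 = [i for i,c in enumerate(...) if c == "R"/"L"]
    let r1 := ((PySem.List.enumerate start.toList 0).filter (fun p => p.2 == 'R')).map (·.1)
    let r2 := ((PySem.List.enumerate end_.toList 0).filter (fun p => p.2 == 'R')).map (·.1)
    let l1 := ((PySem.List.enumerate start.toList 0).filter (fun p => p.2 == 'L')).map (·.1)
    let l2 := ((PySem.List.enumerate end_.toList 0).filter (fun p => p.2 == 'L')).map (·.1)
    if r1.length ≠ r2.length then false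
    -- for a,b in zip(r1,r2): if a > b: return False
    else if (r1.zip r2).any (fun p => p.2 < p.1) then false
    -- for a,b in zip(l1,l2): if a < b: return False
    else if (l1.zip l2).any (fun p => p.1 < p.2) then false
    else true

-- ===== PORT B =====
-- while i < n and s[i] == 'X': i += 1   (returns the new index and the remaining suffix)
def pvSkipX : Int → List Char → Int × List Char
  | i, [] => (i, [])
  | i, c :: t => if c = 'X' then pvSkipX (i + 1) t else (i, c :: t)

-- Source B's outer `while True` loop, as recursion on the characters of `start`
def pvGo : Int → Int → List Char → List Char → Bool
  | _, j, [], ys => (pvSkipX j ys).2.isEmpty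
  | i, j, c :: t, ys =>
    if c = 'X' then pvGo (i + 1) j t ys
    else
      match pvSkipX j ys with
      | (_, []) => false
      | (j', d :: u) =>
        if c ≠ d then false
        else if c = 'R' ∧ j' < i then false
        else if c = 'L' ∧ i < j' then false
        else pvGo (i + 1) (j' + 1) t u

def canTransform_alt (start : String) (end_ : String) : Bool :=
  pvGo 0 0 start.toList end_.toList

-- ===== PRECONDITION & SPEC =====
def Spec_canTransform (start : String) (end_ : String) (out : Bool) : Prop := out = canTransform_alt start end_
instance (start : String) (end_ : String) (out : Bool) : Decidable (Spec_canTransform start end_ out) := by unfold Spec_canTransform; infer_instance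

-- ===== CLAIM (what is proved, stated in full; the proofs are below) =====
def Claim_equal_canTransform : Prop := ∀ (start : String) (end_ : String), Dom_canTransform start end_ → Spec_canTransform start end_ (canTransform start end_)

-- ===== LEMMAS AND PROOFS =====

/-- the non-'X' subsequence -/
def pvStrip (l : List Char) : List Char := l.filter (fun c => c ≠ 'X')

/-- indices (offset by `i`) of the occurrences of `ch` -/
def pvIdx (ch : Char) : Int → List Char → List Int
  | _, [] => []
  | i, c :: t => if c = ch then i :: pvIdx ch (i + 1) t else pvIdx ch (i + 1) t

def pvPairLE (a b : List Int) : Bool := (a.zip b).all (fun p => p.1 ≤ p.2)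
def pvPairGE (a b : List Int) : Bool := (a.zip b).all (fun p => p.2 ≤ p.1)

def pvRHS (i j : Int) (xs ys : List Char) : Bool :=
  (pvStrip xs == pvStrip ys) && pvPairLE (pvIdx 'R' i xs) (pvIdx 'R' j ys)
    && pvPairGE (pvIdx 'L' i xs) (pvIdx 'L' j ys)

-- B's characterisation -----------------------------------------------------

-- unfolding lemmas for pvGo ------------------------------------------------

theorem pvGo_X_left (i j : Int) (t ys : List Char) :
    pvGo i j ('X' :: t) ys = pvGo (i + 1) j t ys := by
  simp [pvGo]

theorem pvGo_X_right (i j : Int) (xs u : List Char) :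
    pvGo i j xs ('X' :: u) = pvGo i (j + 1) xs u := by
  induction xs generalizing i j with
  | nil => simp [pvGo, pvSkipX]
  | cons c t ih =>
    by_cases hc : c = 'X'
    · subst hc; rw [pvGo_X_left, pvGo_X_left, ih]
    · simp [pvGo, hc, pvSkipX]

theorem pvGo_nil_nil (i j : Int) : pvGo i j [] [] = true := by
  simp [pvGo, pvSkipX]

theorem pvGo_nil_cons (i j : Int) (d : Char) (u : List Char) (hd : d ≠ 'X') :
    pvGo i j [] (d :: u) = false := by
  simp [pvGo, pvSkipX, hd]

theorem pvGo_cons_nil (i j : Int) (c : Char) (t : List Char) (hc : c ≠ 'X') :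
    pvGo i j (c :: t) [] = false := by
  simp [pvGo, pvSkipX, hc]

theorem pvGo_cons_cons (i j : Int) (c d : Char) (t u : List Char)
    (hc : c ≠ 'X') (hd : d ≠ 'X') :
    pvGo i j (c :: t) (d :: u) =
      if c ≠ d then false
      else if c = 'R' ∧ j < i then false
      else if c = 'L' ∧ i < j then false
      else pvGo (i + 1) (j + 1) t u := by
  simp [pvGo, hc, pvSkipX, hd]

-- unfolding lemmas for pvRHS ------------------------------------------------

theorem pvRHS_X_left (i j : Int) (t ys : List Char) :
    pvRHS i j ('X' :: t) ys = pvRHS (i + 1) j t ys := by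
  simp [pvRHS, pvStrip, pvIdx]

theorem pvRHS_X_right (i j : Int) (xs u : List Char) :
    pvRHS i j xs ('X' :: u) = pvRHS i (j + 1) xs u := by
  simp [pvRHS, pvStrip, pvIdx]

-- the two-pointer loop computes exactly A's three conditions ----------------

theorem pvGo_eq_rhs (xs : List Char) : ∀ (ys : List Char) (i j : Int),
    pvGo i j xs ys = pvRHS i j xs ys := by
  induction xs with
  | nil =>
    intro ys
    induction ys with
    | nil =>
      intro i j
      rw [pvGo_nil_nil]
      simp [pvRHS, pvStrip, pvIdx, pvPairLE, pvPairGE]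
    | cons d u ihy =>
      intro i j
      by_cases hd : d = 'X'
      · subst hd; rw [pvGo_X_right, pvRHS_X_right]; exact ihy i (j + 1)
      · rw [pvGo_nil_cons i j d u hd]
        simp [pvRHS, pvStrip, hd]
  | cons c t ih =>
    intro ys
    by_cases hc : c = 'X'
    · subst hc
      intro i j
      rw [pvGo_X_left, pvRHS_X_left]
      exact ih ys (i + 1) j
    · induction ys with
      | nil =>
        intro i j
        rw [pvGo_cons_nil i j c t hc]
        simp [pvRHS, pvStrip, hc]
      | cons d u ihy =>
        intro i j
        by_cases hd : d = 'X'
        · subst hd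
          rw [pvGo_X_right, pvRHS_X_right]
          exact ihy i (j + 1)
        · rw [pvGo_cons_cons i j c d t u hc hd]
          by_cases hcd : c = d
          · subst hcd
            simp only [ne_eq, not_true_eq_false, if_false]
            by_cases hR : c = 'R'
            · subst hR
              by_cases hij : j < i
              · rw [if_pos ⟨rfl, hij⟩]
                have hle : ¬ (i ≤ j) := by omega
                simp [pvRHS, pvStrip, pvIdx, pvPairLE, hc, hle]
              · rw [if_neg (by rintro ⟨_, h'⟩; exact hij h')]
                rw [if_neg (by rintro ⟨h', _⟩; exact absurd h' (by decide))]
                rw [ih u (i + 1) (j + 1)]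
                have hle : i ≤ j := by omega
                simp only [pvRHS, pvStrip, pvIdx, pvPairLE, pvPairGE]
                simp [hc, hle, Bool.and_assoc]
            · by_cases hL : c = 'L'
              · subst hL
                rw [if_neg (by rintro ⟨h', _⟩; exact absurd h' (by decide))]
                by_cases hij : i < j
                · rw [if_pos ⟨rfl, hij⟩]
                  have hle : ¬ (j ≤ i) := by omega
                  simp [pvRHS, pvStrip, pvIdx, pvPairGE, hc, hle]
                · rw [if_neg (by rintro ⟨_, h'⟩; exact hij h')]
                  rw [ih u (i + 1) (j + 1)]
                  have hle : j ≤ i := by omega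
                  simp only [pvRHS, pvStrip, pvIdx, pvPairLE, pvPairGE]
                  simp [hc, hle, Bool.and_assoc]
              · rw [if_neg (by rintro ⟨h', _⟩; exact hR h')]
                rw [if_neg (by rintro ⟨h', _⟩; exact hL h')]
                rw [ih u (i + 1) (j + 1)]
                simp [pvRHS, pvStrip, pvIdx, hR, hL, hc]
          · rw [if_pos hcd]
            symm
            simp [pvRHS, pvStrip, hc, hd, hcd]

-- A's characterisation -----------------------------------------------------

theorem replace_go_eq : ∀ (l : List Char) (fuel : Nat) (acc : List Char), l.length ≤ fuel →
    PySem.Chars.replace.go ['X'] [] fuel l acc = acc.reverse ++ pvStrip l := by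
  intro l
  induction l with
  | nil => intro fuel acc _; cases fuel <;> simp [PySem.Chars.replace.go, pvStrip]
  | cons c t ih =>
    intro fuel acc h
    cases fuel with
    | zero => simp at h
    | succ f =>
      simp only [PySem.Chars.replace.go]
      by_cases hc : c = 'X'
      · subst hc
        have : List.isPrefixOf ['X'] ('X' :: t) = true := by simp [List.isPrefixOf]
        rw [if_pos this]
        simpa [pvStrip] using ih f acc (by simpa using h)
      · have : List.isPrefixOf ['X'] (c :: t) = false := by
          simp only [List.isPrefixOf, Bool.and_true]
          exact beq_eq_false_iff_ne.mpr (Ne.symm hc)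
        rw [this]
        simp only [Bool.false_eq_true, if_false]
        rw [ih f (c :: acc) (by simpa using Nat.le_of_succ_le_succ h)]
        simp [pvStrip, hc]

theorem replace_eq_strip (l : List Char) : PySem.Chars.replace l ['X'] [] = pvStrip l := by
  rw [PySem.Chars.replace]
  rw [if_neg (by simp)]
  simpa using replace_go_eq l l.length [] le_rfl

theorem idx_eq_enum (ch : Char) : ∀ (l : List Char) (i : Int),
    ((PySem.List.enumerate l i).filter (fun p => p.2 == ch)).map (·.1) = pvIdx ch i l := by
  intro l
  induction l with
  | nil => intro i; simp [PySem.List.enumerate_nil, pvIdx]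
  | cons c t ih =>
    intro i
    rw [PySem.List.enumerate_cons]
    by_cases hc : c = ch <;> simp [pvIdx, hc, ih]

theorem idx_length (ch : Char) (hch : ch ≠ 'X') : ∀ (l : List Char) (i : Int),
    (pvIdx ch i l).length = (pvStrip l).count ch := by
  intro l
  induction l with
  | nil => intro i; simp [pvIdx, pvStrip]
  | cons c t ih =>
    intro i
    by_cases hc : c = ch
    · subst hc; simp [pvIdx, pvStrip, hch, ih]
    · by_cases hx : c = 'X' <;>
        simp [pvIdx, pvStrip, hc, hx, ih, Ne.symm hch]

theorem canTransform_eq_rhs (start end_ : String) :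
    canTransform start end_ = pvRHS 0 0 start.toList end_.toList := by
  rw [canTransform, pvRHS]
  by_cases hs : pvStrip start.toList = pvStrip end_.toList
  · have hrepl : PySem.Str.replace start "X" "" = PySem.Str.replace end_ "X" "" := by
      apply String.toList_inj.mp
      simpa [replace_eq_strip] using hs
    rw [if_neg (by simp [hrepl])]
    simp only [idx_eq_enum]
    have hlen : (pvIdx 'R' 0 start.toList).length = (pvIdx 'R' 0 end_.toList).length := by
      rw [idx_length 'R' (by decide), idx_length 'R' (by decide), hs]
    rw [if_neg (by simp [hlen])]
    have hbeq : (pvStrip start.toList == pvStrip end_.toList) = true := by simp [hs]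
    rw [hbeq]
    simp only [Bool.true_and, pvPairLE, pvPairGE]
    by_cases hR : (((pvIdx 'R' 0 start.toList).zip (pvIdx 'R' 0 end_.toList)).any
        (fun p => decide (p.2 < p.1))) = true
    · rw [if_pos hR]
      rw [List.any_eq_true] at hR
      obtain ⟨p, hp, hlt⟩ := hR
      symm
      simp only [Bool.and_eq_false_iff, List.all_eq_false]
      left; exact ⟨p, hp, by simp at hlt ⊢; omega⟩
    · rw [if_neg hR]
      simp only [Bool.not_eq_true, List.any_eq_false] at hR
      have hall : ((pvIdx 'R' 0 start.toList).zip (pvIdx 'R' 0 end_.toList)).all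
          (fun p => decide (p.1 ≤ p.2)) = true := by
        rw [List.all_eq_true]; intro p hp
        have := hR p hp; simp at this ⊢; omega
      rw [hall]
      simp only [Bool.true_and]
      by_cases hL : (((pvIdx 'L' 0 start.toList).zip (pvIdx 'L' 0 end_.toList)).any
          (fun p => decide (p.1 < p.2))) = true
      · rw [if_pos hL]
        rw [List.any_eq_true] at hL
        obtain ⟨p, hp, hlt⟩ := hL
        symm
        simp only [List.all_eq_false]
        exact ⟨p, hp, by simp at hlt ⊢; omega⟩
      · rw [if_neg hL]
        simp only [Bool.not_eq_true, List.any_eq_false] at hL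
        symm
        rw [List.all_eq_true]; intro p hp
        have := hL p hp; simp at this ⊢; omega
  · have hrepl : PySem.Str.replace start "X" "" ≠ PySem.Str.replace end_ "X" "" := by
      intro h
      apply hs
      have := congrArg String.toList h
      simpa [replace_eq_strip] using this
    rw [if_pos hrepl]
    have : (pvStrip start.toList == pvStrip end_.toList) = false := by simp [hs]
    rw [this]
    simp

-- ===== VERDICT (by name: the statement is the Claim_ definition above) =====
theorem canTransform_spec : Claim_equal_canTransform := by
  intro start end_ _
  unfold Spec_canTransform canTransform_alt
  rw [canTransform_eq_rhs, pvGo_eq_rhs]
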